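-- pv_equiv track=rewrite | github.com/serina-robinson/adenylpred | antismash/modules/nrps_pks/NRPSpredictor2_run.py | build_position_list
-- ===== SOURCE A (Python) =====
-- from typing import Any, Dict, List, Set
--
-- def build_position_list(positions: List[int], reference_seq: str) -> List[int]:
--     """ Adjusts a list of positions to account for gaps in the reference sequence
--
--         Arguments:
--             positions: a list of ints that represent positions of interest in
--                        the reference sequence
--             reference_seq: the (aligned) reference sequence
--
--         Returns:
--             a new list of positions, each >= the original position
--     """
--     poslist = []
--     position = 0
--     for i, ref in enumerate(reference_seq):
--         if ref != "-":
--             if position in positions: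
--                 poslist.append(i)
--             position += 1
--     return poslist
-- ===== SOURCE B (Python) =====
-- def build_position_list(positions, reference_seq):
--     mapping = [i for i, ref in enumerate(reference_seq) if ref != "-"]
--     n = len(mapping)
--     return [mapping[p] for p in sorted(set(positions)) if 0 <= p < n]
-- ===== Notes on version B (the rewrite author's own statement) =====
-- stated objective: faster
-- what changed: Replaces A's per-character membership scan over positions with a one-pass gapless-to-aligned index table plus lookups over sorted(set(positions)).
import Mathlib
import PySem

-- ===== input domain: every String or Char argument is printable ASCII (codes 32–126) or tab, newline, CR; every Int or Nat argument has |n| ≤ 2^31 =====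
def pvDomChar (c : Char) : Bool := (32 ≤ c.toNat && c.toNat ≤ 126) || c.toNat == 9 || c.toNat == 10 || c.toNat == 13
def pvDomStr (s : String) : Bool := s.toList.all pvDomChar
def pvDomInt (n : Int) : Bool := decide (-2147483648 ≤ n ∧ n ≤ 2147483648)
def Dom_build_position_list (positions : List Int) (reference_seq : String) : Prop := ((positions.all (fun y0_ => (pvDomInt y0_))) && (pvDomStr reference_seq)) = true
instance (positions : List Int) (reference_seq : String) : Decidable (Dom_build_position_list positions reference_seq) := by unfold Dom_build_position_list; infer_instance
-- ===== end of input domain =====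

-- B builds an ungapped→aligned index table once and looks it up over sorted(set(positions)),
-- replacing A's per-character membership scan over positions.

-- ===== PORT A =====
def build_position_list (positions : List Int) (reference_seq : String) : List Int :=
  ((PySem.List.enumerate reference_seq.toList 0).foldl
    (fun (st : List Int × Int) iref =>
      if iref.2 ≠ '-' then
        (if st.2 ∈ positions then st.1 ++ [iref.1] else st.1, st.2 + 1)
      else st)
    ([], 0)).1

-- ===== PORT B =====
def build_position_list_alt (positions : List Int) (reference_seq : String) : List Int :=
  let mapping : List Int :=
    ((PySem.List.enumerate reference_seq.toList 0).filter (fun iref => iref.2 != '-')).map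
      (fun iref => iref.1)
  let n : Int := mapping.length
  ((PySem.List.sorted (PySem.Set.ofList positions) (fun x => x) false).filter
      (fun p => decide (0 ≤ p) && decide (p < n))).map
    (fun p => PySem.List.pyGetD mapping p 0)

-- ===== PRECONDITION & SPEC =====
def Spec_build_position_list (positions : List Int) (reference_seq : String) (out : List Int) : Prop := out = build_position_list_alt positions reference_seq
instance (positions : List Int) (reference_seq : String) (out : List Int) : Decidable (Spec_build_position_list positions reference_seq out) := by unfold Spec_build_position_list; infer_instance

-- ===== CLAIM (what is proved, stated in full; the proofs are below) =====
def Claim_equal_build_position_list : Prop := ∀ (positions : List Int) (reference_seq : String), Dom_build_position_list positions reference_seq → Spec_build_position_list positions reference_seq (build_position_list positions reference_seq)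

-- ===== LEMMAS AND PROOFS =====

-- A's loop, with the accumulator-append made explicit
def pvG (positions : List Int) : List (Int × Char) → Int → List Int
  | [], _ => []
  | (i, ch) :: rest, c =>
    if ch ≠ '-' then (if c ∈ positions then [i] else []) ++ pvG positions rest (c + 1)
    else pvG positions rest c

-- the same selection, over the extracted non-gap index list
def pvH (positions : List Int) : List Int → Int → List Int
  | [], _ => []
  | m :: ms, c => (if c ∈ positions then [m] else []) ++ pvH positions ms (c + 1)

-- the integers c, c+1, …, c+n-1
def pvSeq : Int → Nat → List Int
  | _, 0 => []
  | c, n + 1 => c :: pvSeq (c + 1) n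

theorem pvG_foldl (positions : List Int) (pairs : List (Int × Char)) (acc : List Int) (c : Int) :
    (pairs.foldl
      (fun (st : List Int × Int) iref =>
        if iref.2 ≠ '-' then
          (if st.2 ∈ positions then st.1 ++ [iref.1] else st.1, st.2 + 1)
        else st)
      (acc, c)).1 = acc ++ pvG positions pairs c := by
  induction pairs generalizing acc c with
  | nil => simp [pvG]
  | cons p rest ih =>
    obtain ⟨i, ch⟩ := p
    rw [List.foldl_cons]
    dsimp only
    by_cases hch : ch ≠ '-'
    · rw [if_pos hch]
      by_cases hc : c ∈ positions
      · rw [if_pos hc, ih]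
        simp [pvG, hch, hc]
      · rw [if_neg hc, ih]
        simp [pvG, hch, hc]
    · rw [if_neg hch, ih]
      simp [pvG, hch]

theorem pvG_eq_pvH (positions : List Int) (pairs : List (Int × Char)) (c : Int) :
    pvG positions pairs c =
      pvH positions ((pairs.filter (fun p => p.2 != '-')).map (fun p => p.1)) c := by
  induction pairs generalizing c with
  | nil => simp [pvG, pvH]
  | cons p rest ih =>
    obtain ⟨i, ch⟩ := p
    by_cases hch : ch ≠ '-'
    · simp [pvG, pvH, hch, ih]
    · simp at hch
      simp [pvG, hch, ih]

theorem mem_pvSeq (p : Int) (c : Int) (n : Nat) : p ∈ pvSeq c n ↔ c ≤ p ∧ p < c + n := by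
  induction n generalizing c with
  | zero => simp [pvSeq]
  | succ k ih =>
    simp only [pvSeq, List.mem_cons, ih]
    constructor
    · rintro (rfl | ⟨h1, h2⟩) <;> constructor <;> omega
    · rintro ⟨h1, h2⟩
      by_cases hp : p = c
      · exact Or.inl hp
      · exact Or.inr ⟨by omega, by omega⟩

theorem pairwise_pvSeq (c : Int) (n : Nat) : (pvSeq c n).Pairwise (· < ·) := by
  induction n generalizing c with
  | zero => exact List.Pairwise.nil
  | succ k ih =>
    refine List.Pairwise.cons (fun p hp => ?_) (ih (c + 1))
    have := (mem_pvSeq p (c + 1) k).1 hp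
    omega

theorem pyGetD_cons_pos (m : Int) (ms : List Int) (q : Int) (hq : 1 ≤ q) :
    PySem.List.pyGetD (m :: ms) q 0 = PySem.List.pyGetD ms (q - 1) 0 := by
  have h2 : 0 ≤ q - 1 := by omega
  obtain ⟨k, hk⟩ := Int.eq_ofNat_of_zero_le h2
  have h1 : q = (k : Int) + 1 := by omega
  rw [h1]
  have h3 : ((k : Int) + 1 - 1) = (k : Int) := by omega
  rw [h3]
  simp only [PySem.List.pyGetD, PySem.List.pyGet?_cons_succ]

theorem pvH_eq_map (positions : List Int) (M : List Int) (c : Int) :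
    pvH positions M c =
      ((pvSeq c M.length).filter (fun p => decide (p ∈ positions))).map
        (fun p => PySem.List.pyGetD M (p - c) 0) := by
  induction M generalizing c with
  | nil => simp [pvH, pvSeq]
  | cons m ms ih =>
    simp only [pvH, List.length_cons, pvSeq, List.filter_cons]
    have hmap : ∀ p ∈ (pvSeq (c + 1) ms.length).filter (fun p => decide (p ∈ positions)),
        PySem.List.pyGetD (m :: ms) (p - c) 0 = PySem.List.pyGetD ms (p - (c + 1)) 0 := by
      intro p hp
      have hmem := (mem_pvSeq p (c + 1) ms.length).1 (List.mem_of_mem_filter hp)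
      rw [pyGetD_cons_pos m ms (p - c) (by omega)]
      congr 1
      omega
    have hhead : PySem.List.pyGetD (m :: ms) (c - c) 0 = m := by
      simp [PySem.List.pyGetD]
    by_cases hc : c ∈ positions
    · simp only [hc, decide_true, if_pos, List.map_cons, hhead, ih (c + 1)]
      simp [List.map_congr_left hmap]
    · simp only [hc, decide_false, ih (c + 1)]
      simp [List.map_congr_left hmap]

theorem filter_sorted_eq_filter_pvSeq (positions : List Int) (n : Nat) :
    ((PySem.List.sorted (PySem.Set.ofList positions) (fun x => x) false).filter
      (fun p => decide (0 ≤ p) && decide (p < (n : Int)))) =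
    ((pvSeq 0 n).filter (fun p => decide (p ∈ positions))) := by
  set S := ((PySem.List.sorted (PySem.Set.ofList positions) (fun x => x) false).filter
      (fun p => decide (0 ≤ p) && decide (p < (n : Int)))) with hS
  set L := ((pvSeq 0 n).filter (fun p => decide (p ∈ positions))) with hL
  have hSpw : S.Pairwise (· < ·) :=
    (PySem.List.sorted_ofList_pairwise_lt (xs := positions)).filter _
  have hLpw : L.Pairwise (· < ·) := (pairwise_pvSeq 0 n).filter _
  have hmem : ∀ p : Int, p ∈ L ↔ p ∈ S := by
    intro p
    simp only [hL, hS, List.mem_filter, mem_pvSeq, PySem.List.mem_sorted,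
      PySem.Set.mem_ofList, decide_eq_true_eq, Bool.and_eq_true]
    constructor
    · rintro ⟨⟨h1, h2⟩, h3⟩; exact ⟨h3, h1, by omega⟩
    · rintro ⟨h3, h1, h2⟩; exact ⟨⟨h1, by omega⟩, h3⟩
  have hSnodup : S.Nodup := hSpw.imp (fun h => ne_of_lt h)
  have hLnodup : L.Nodup := hLpw.imp (fun h => ne_of_lt h)
  have hperm : L.Perm S := (List.perm_ext_iff_of_nodup hLnodup hSnodup).2 hmem
  have h1 : PySem.List.sorted S (fun x => x) false = S :=
    PySem.List.sorted_eq_self_of_pairwise S (fun x => x) (hSpw.imp (fun h => le_of_lt h))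
  have h2 : PySem.List.sorted S (fun x => x) false = L :=
    PySem.List.sorted_eq_of_perm_of_pairwise_lt S L (fun x => x) hperm hLpw
  rw [← h1, h2]

-- ===== VERDICT (by name: the statement is the Claim_ definition above) =====
theorem build_position_list_spec : Claim_equal_build_position_list := by
  intro positions reference_seq _
  unfold Spec_build_position_list build_position_list build_position_list_alt
  rw [pvG_foldl, List.nil_append, pvG_eq_pvH, pvH_eq_map,
    ← filter_sorted_eq_filter_pvSeq positions]
  have hsub : (fun p : Int =>
      PySem.List.pyGetD
        (((PySem.List.enumerate reference_seq.toList 0).filter (fun iref => iref.2 != '-')).map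
          (fun iref => iref.1)) (p - 0) 0) =
      (fun p : Int =>
        PySem.List.pyGetD
          (((PySem.List.enumerate reference_seq.toList 0).filter (fun iref => iref.2 != '-')).map
            (fun iref => iref.1)) p 0) := by
    funext p
    norm_num
  rw [hsub]
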